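-- pv_equiv track=rewrite | github.com/vegetable68/sbb | mpc_local/test_mpc_correctness.py | flip_string
-- ===== SOURCE A (Python) =====
-- def flip_string(bin_string: str) -> str:
--     '''
--     Parameters
--     ----------
--     bin_string: a binary string
--
--     Returns
--     -------
--     The string consisting of the bitwise negatino of `bin_string`
--     '''
--     result = ''
--     for c in bin_string:
--         if c == '0':
--             result += '1'
--         elif c == '1':
--             result += '0'
--         else:
--             raise Exception('Invalid string supplied')
--     return result
-- ===== SOURCE B (Python) =====
-- def flip_string(bin_string: str) -> str:
--     if set(bin_string) - {'0', '1'}: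
--         raise Exception('Invalid string supplied')
--     return bin_string.translate(str.maketrans('01', '10'))
-- ===== Notes on version B (the rewrite author's own statement) =====
-- stated objective: idiomatic
-- what changed: Replaces the per-character branch-and-concatenate loop with a standalone set-based validation pass followed by a table-driven bulk str.translate transform.
import Mathlib
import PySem

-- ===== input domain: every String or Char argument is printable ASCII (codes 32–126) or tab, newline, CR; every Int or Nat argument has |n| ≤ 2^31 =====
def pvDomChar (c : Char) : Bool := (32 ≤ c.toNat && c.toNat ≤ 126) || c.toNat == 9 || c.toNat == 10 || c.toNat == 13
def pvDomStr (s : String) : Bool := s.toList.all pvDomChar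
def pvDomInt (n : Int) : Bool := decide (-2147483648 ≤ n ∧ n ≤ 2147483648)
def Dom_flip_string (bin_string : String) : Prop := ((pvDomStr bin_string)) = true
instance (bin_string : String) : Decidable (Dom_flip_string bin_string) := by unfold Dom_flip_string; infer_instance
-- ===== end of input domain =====

-- B replaces A's per-character branch-and-concatenate loop by a set-based validation pass
-- followed by a table-driven bulk transform (idiomatic; behaviour proved on Pre_).

-- ===== PORT A =====
-- result = ''; for c in bin_string: append '1'/'0' or raise.  The raise branch is excluded by
-- Pre_flip_string; the port leaves the accumulator unchanged there (never reached under Pre_).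
def flip_string (bin_string : String) : String :=
  String.mk (bin_string.toList.foldl
    (fun result c =>
      if c = '0' then result ++ ['1']
      else if c = '1' then result ++ ['0']
      else result) [])

-- ===== PORT B =====
-- 'set(bin_string) - {'0','1'}' nonempty → raise (excluded by Pre_; the port returns "" there,
-- never reached under Pre_); else translate via the table '0'→'1', '1'→'0'.
def flip_string_alt (bin_string : String) : String :=
  if ((PySem.Set.ofList bin_string.toList).filter
        (fun c => decide (c ≠ '0' ∧ c ≠ '1'))) ≠ [] then ""
  else String.mk (bin_string.toList.map
    (fun c => if c = '0' then '1' else if c = '1' then '0' else c))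

-- ===== PRECONDITION & SPEC =====
-- Pre_ : exactly the inputs where A (and B) return normally: every character is '0' or '1'.
def Pre_flip_string (bin_string : String) : Prop :=
  bin_string.toList.all (fun c => c = '0' || c = '1') = true
instance (bin_string : String) : Decidable (Pre_flip_string bin_string) := by
  unfold Pre_flip_string; infer_instance

def pvWitness_flip_string : String := "0101"

def Spec_flip_string (bin_string : String) (out : String) : Prop := out = flip_string_alt bin_string
instance (bin_string : String) (out : String) : Decidable (Spec_flip_string bin_string out) := by unfold Spec_flip_string; infer_instance

-- ===== CLAIM (what is proved, stated in full; the proofs are below) =====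
def Claim_equal_flip_string : Prop := ∀ (bin_string : String), Dom_flip_string bin_string → Pre_flip_string bin_string → Spec_flip_string bin_string (flip_string bin_string)

-- ===== LEMMAS AND PROOFS =====

theorem flip_foldl_eq_map (l : List Char) (acc : List Char)
    (h : ∀ c ∈ l, c = '0' ∨ c = '1') :
    l.foldl (fun result c =>
      if c = '0' then result ++ ['1']
      else if c = '1' then result ++ ['0']
      else result) acc
    = acc ++ l.map (fun c => if c = '0' then '1' else if c = '1' then '0' else c) := by
  induction l generalizing acc with
  | nil => simp
  | cons c t ih =>
    have hc := h c (by simp)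
    have ht : ∀ x ∈ t, x = '0' ∨ x = '1' := fun x hx => h x (List.mem_cons_of_mem _ hx)
    rcases hc with hc | hc <;> subst hc <;> simp [ih _ ht]

theorem flip_filter_nil (bin_string : String)
    (hp : Pre_flip_string bin_string) :
    ((PySem.Set.ofList bin_string.toList).filter
        (fun c => decide (c ≠ '0' ∧ c ≠ '1'))) = [] := by
  rw [List.filter_eq_nil_iff]
  intro c hc
  have hm : c ∈ bin_string.toList := (PySem.Set.mem_ofList _ _).1 hc
  have := List.all_eq_true.1 hp c hm
  simp at this ⊢
  tauto

-- ===== VERDICT (by name: the statement is the Claim_ definition above) =====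
theorem flip_string_spec : Claim_equal_flip_string := by
  intro s _ hp
  unfold Spec_flip_string flip_string flip_string_alt
  rw [flip_filter_nil s hp]
  simp only [ne_eq, not_true_eq_false, if_false]
  rw [flip_foldl_eq_map]
  · simp
  · intro c hc
    have := List.all_eq_true.1 hp c hc
    simpa using this
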